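-- pv_equiv track=rewrite | github.com/dil-beszabo/szakdolgozat | code/process_nyt_articles.py | extract_title_and_fulltext
-- ===== SOURCE A (Python) =====
-- META_HEADERS = {
--     "Subject:", "Location:", "People:", "Company / organization:", "URL:", "Title:",
--     "Publication title:", "Pages:", "Publication year:", "Publication date:", "Section:",
--     "Publisher:", "Place of publication:", "Country of publication:", "Publication subject:",
--     "ISSN:", "Source type:", "Language of publication:", "Document type:",
--     "ProQuest document ID:", "Document URL:", "Copyright:", "Last updated:", "Database:"
-- }
--
-- def extract_title_and_fulltext(block: str):
--     lines = [l.strip() for l in block.splitlines() if l.strip()]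
--     title_line = next((l for l in lines if l.startswith("Title:")), None)
--     title = title_line.replace("Title:", "").strip() if title_line else (lines[0] if lines else "")
--     # find Full text:
--     ft_idx = next((i for i, l in enumerate(lines) if l.startswith("Full text:")), None)
--     if ft_idx is None:
--         return title, ""
--     text_lines = []
--     for l in lines[ft_idx:]:
--         if any(l.startswith(h) for h in META_HEADERS) and not l.startswith("Full text:"):
--             break
--         if l.startswith("Full text:"):
--             l = l[len("Full text:"):].strip()
--         text_lines.append(l)
--     return title, " ".join(text_lines).strip()
-- ===== SOURCE B (Python) =====
-- META_HEADERS = {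
--     "Subject:", "Location:", "People:", "Company / organization:", "URL:", "Title:",
--     "Publication title:", "Pages:", "Publication year:", "Publication date:", "Section:",
--     "Publisher:", "Place of publication:", "Country of publication:", "Publication subject:",
--     "ISSN:", "Source type:", "Language of publication:", "Document type:",
--     "ProQuest document ID:", "Document URL:", "Copyright:", "Last updated:", "Database:"
-- }
--
-- def extract_title_and_fulltext(block: str):
--     # one forward pass over the cleaned non-empty lines
--     lines = [l.strip() for l in block.splitlines() if l.strip()]
--     title = None
--     parts = []
--     in_text = False
--     done = False
--     for l in lines:
--         if title is None and l.startswith("Title:"):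
--             title = l.replace("Title:", "").strip()
--         if done:
--             continue
--         if in_text:
--             if l.startswith("Full text:"):
--                 parts.append(l[len("Full text:"):].strip())
--             elif any(l.startswith(h) for h in META_HEADERS):
--                 done = True
--             else:
--                 parts.append(l)
--         elif l.startswith("Full text:"):
--             in_text = True
--             parts.append(l[len("Full text:"):].strip())
--     if title is None:
--         title = lines[0] if lines else ""
--     return title, " ".join(parts).strip()
-- ===== Notes on version B (the rewrite author's own statement) =====
-- stated objective: simpler
-- what changed: Replaces A's three separate scans (title search, 'Full text:' index search, slice loop with break) by one forward pass over the cleaned lines maintaining title/in_text/done flags.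
import Mathlib
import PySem

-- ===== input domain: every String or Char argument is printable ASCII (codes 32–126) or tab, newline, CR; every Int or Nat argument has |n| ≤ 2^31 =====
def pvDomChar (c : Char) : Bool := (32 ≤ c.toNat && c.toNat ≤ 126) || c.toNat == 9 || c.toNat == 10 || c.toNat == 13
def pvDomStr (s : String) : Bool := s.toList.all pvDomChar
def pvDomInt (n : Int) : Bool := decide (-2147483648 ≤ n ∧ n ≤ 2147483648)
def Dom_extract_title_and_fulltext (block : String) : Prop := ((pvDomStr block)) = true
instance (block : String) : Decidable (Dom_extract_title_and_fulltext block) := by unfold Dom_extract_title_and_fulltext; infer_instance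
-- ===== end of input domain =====

-- B replaces A's three scans (title search, 'Full text:' index search, slice loop with break)
-- by a single forward pass over the cleaned lines; objective: simpler, same cost.

-- shared module-level constant META_HEADERS (used only under `any`, so set order is irrelevant)
def pvMetaHeaders : List String :=
  ["Subject:", "Location:", "People:", "Company / organization:", "URL:", "Title:",
   "Publication title:", "Pages:", "Publication year:", "Publication date:", "Section:",
   "Publisher:", "Place of publication:", "Country of publication:", "Publication subject:",
   "ISSN:", "Source type:", "Language of publication:", "Document type:",
   "ProQuest document ID:", "Document URL:", "Copyright:", "Last updated:", "Database:"]

-- [l.strip() for l in block.splitlines() if l.strip()]  (strip is idempotent, so map-then-filter is exact)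
def pvCleanLines (block : String) : List String :=
  ((PySem.Str.splitlines block).map PySem.Str.strip).filter (fun l => !(l == ""))

-- ===== PORT A =====
-- the `for l in lines[ft_idx:]` loop with its break
def pvAloop : List String → List String
  | [] => []
  | l :: rest =>
    if (pvMetaHeaders.any fun h => PySem.Str.startswith l h) && !(PySem.Str.startswith l "Full text:") then
      []
    else
      (if PySem.Str.startswith l "Full text:" then
        PySem.Str.strip (PySem.Str.slice l (some 10) none)
      else l) :: pvAloop rest

def extract_title_and_fulltext (block : String) : String × String :=
  let lines := pvCleanLines block
  let title_line := lines.find? (fun l => PySem.Str.startswith l "Title:")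
  let title := match title_line with
    | some tl => PySem.Str.strip (PySem.Str.replace tl "Title:" "")
    | none => match lines with
      | [] => ""
      | l0 :: _ => l0
  match lines.findIdx? (fun l => PySem.Str.startswith l "Full text:") with
  | none => (title, "")
  | some i => (title, PySem.Str.strip (PySem.Str.join " " (pvAloop (lines.drop i))))

-- ===== PORT B =====
-- single forward pass: state = (title?, parts, in_text, done)
def pvBloop : List String → Option String → List String → Bool → Bool → Option String × List String
  | [], title?, parts, _, _ => (title?, parts)
  | l :: rest, title?, parts, inText, done =>
    let title? := if title?.isNone && PySem.Str.startswith l "Title:" then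
        some (PySem.Str.strip (PySem.Str.replace l "Title:" ""))
      else title?
    if done then pvBloop rest title? parts inText done
    else if inText then
      if PySem.Str.startswith l "Full text:" then
        pvBloop rest title? (parts ++ [PySem.Str.strip (PySem.Str.slice l (some 10) none)]) inText done
      else if pvMetaHeaders.any (fun h => PySem.Str.startswith l h) then
        pvBloop rest title? parts inText true
      else
        pvBloop rest title? (parts ++ [l]) inText done
    else if PySem.Str.startswith l "Full text:" then
      pvBloop rest title? (parts ++ [PySem.Str.strip (PySem.Str.slice l (some 10) none)]) true done
    else
      pvBloop rest title? parts inText done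

def extract_title_and_fulltext_alt (block : String) : String × String :=
  let lines := pvCleanLines block
  let r := pvBloop lines none [] false false
  let title := match r.1 with
    | some t => t
    | none => match lines with
      | [] => ""
      | l0 :: _ => l0
  (title, PySem.Str.strip (PySem.Str.join " " r.2))

-- ===== PRECONDITION & SPEC =====
def Spec_extract_title_and_fulltext (block : String) (out : String × String) : Prop := out = extract_title_and_fulltext_alt block
instance (block : String) (out : String × String) : Decidable (Spec_extract_title_and_fulltext block out) := by unfold Spec_extract_title_and_fulltext; infer_instance

-- ===== CLAIM (what is proved, stated in full; the proofs are below) =====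
def Claim_equal_extract_title_and_fulltext : Prop := ∀ (block : String), Dom_extract_title_and_fulltext block → Spec_extract_title_and_fulltext block (extract_title_and_fulltext block)

-- ===== LEMMAS AND PROOFS =====

-- how B's title state evolves over the remaining lines
def pvTUpd (t : Option String) (lines : List String) : Option String :=
  match t with
  | some x => some x
  | none => (lines.find? (fun l => PySem.Str.startswith l "Title:")).map
      (fun tl => PySem.Str.strip (PySem.Str.replace tl "Title:" ""))

-- text A produces from the remaining lines (before the region is found)
def pvAtext (lines : List String) : List String :=
  match lines.findIdx? (fun l => PySem.Str.startswith l "Full text:") with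
  | none => []
  | some i => pvAloop (lines.drop i)

theorem pvTUpd_cons (t : Option String) (l : String) (rest : List String) :
    pvTUpd t (l :: rest)
      = pvTUpd (if t.isNone && PySem.Str.startswith l "Title:" then
          some (PySem.Str.strip (PySem.Str.replace l "Title:" "")) else t) rest := by
  cases t with
  | some x =>
    simp only [pvTUpd, Option.isNone_some, Bool.false_and, Bool.false_eq_true, reduceIte]
  | none =>
    cases h : PySem.Str.startswith l "Title:" with
    | false =>
      have hf : List.find? (fun l => PySem.Str.startswith l "Title:") (l :: rest)
          = List.find? (fun l => PySem.Str.startswith l "Title:") rest :=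
        List.find?_cons_of_neg (by simpa using h)
      simp only [pvTUpd, Bool.and_false, Bool.false_eq_true, reduceIte, hf]
    | true =>
      have hf : List.find? (fun l => PySem.Str.startswith l "Title:") (l :: rest) = some l :=
        List.find?_cons_of_pos h
      simp only [pvTUpd, Bool.and_true, Option.isNone_none, reduceIte, hf, Option.map_some]

theorem pvBloop_done (lines : List String) : ∀ (t : Option String) (parts : List String) (inText : Bool),
    pvBloop lines t parts inText true = (pvTUpd t lines, parts) := by
  induction lines with
  | nil => intro t parts inText; cases t <;> rfl
  | cons l rest ih =>
    intro t parts inText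
    rw [pvTUpd_cons]
    simp only [pvBloop, reduceIte, ih]

theorem pvBloop_inText (lines : List String) : ∀ (t : Option String) (parts : List String),
    pvBloop lines t parts true false = (pvTUpd t lines, parts ++ pvAloop lines) := by
  induction lines with
  | nil => intro t parts; cases t <;> simp [pvBloop, pvTUpd, pvAloop]
  | cons l rest ih =>
    intro t parts
    rw [pvTUpd_cons]
    cases hft : PySem.Str.startswith l "Full text:" with
    | true =>
      simp only [pvBloop, pvAloop, hft, Bool.not_true, Bool.and_false, Bool.false_eq_true,
        reduceIte, ih, List.append_assoc, List.singleton_append]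
    | false =>
      cases hm : (pvMetaHeaders.any fun h => PySem.Str.startswith l h) with
      | true =>
        simp only [pvBloop, pvAloop, hft, hm, Bool.not_false, Bool.and_true, Bool.false_eq_true,
          reduceIte, pvBloop_done, List.append_nil]
      | false =>
        simp only [pvBloop, pvAloop, hft, hm, Bool.not_false, Bool.and_true, Bool.false_eq_true,
          reduceIte, ih, List.append_assoc, List.singleton_append]

theorem pvBloop_scan (lines : List String) : ∀ (t : Option String) (parts : List String),
    pvBloop lines t parts false false = (pvTUpd t lines, parts ++ pvAtext lines) := by
  induction lines with
  | nil => intro t parts; cases t <;> simp [pvBloop, pvTUpd, pvAtext]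
  | cons l rest ih =>
    intro t parts
    rw [pvTUpd_cons]
    cases hft : PySem.Str.startswith l "Full text:" with
    | true =>
      have htext : pvAtext (l :: rest) = pvAloop (l :: rest) := by
        simp only [pvAtext, List.findIdx?_cons, hft, reduceIte, List.drop_zero]
      rw [htext]
      simp only [pvBloop, pvAloop, hft, Bool.not_true, Bool.and_false, Bool.false_eq_true,
        reduceIte, pvBloop_inText, List.append_assoc, List.singleton_append]
    | false =>
      have htext : pvAtext (l :: rest) = pvAtext rest := by
        simp only [pvAtext, List.findIdx?_cons, hft, Bool.false_eq_true, reduceIte]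
        cases h : rest.findIdx? (fun l => PySem.Str.startswith l "Full text:") with
        | none => simp
        | some i => simp [List.drop_succ_cons]
      rw [htext]
      simp only [pvBloop, hft, Bool.false_eq_true, reduceIte, ih]

-- ===== VERDICT (by name: the statement is the Claim_ definition above) =====
theorem extract_title_and_fulltext_spec : Claim_equal_extract_title_and_fulltext := by
  intro block _
  show extract_title_and_fulltext block = extract_title_and_fulltext_alt block
  unfold extract_title_and_fulltext extract_title_and_fulltext_alt
  simp only [pvBloop_scan, pvTUpd, List.nil_append]
  have hjoin : PySem.Str.strip (PySem.Str.join " " ([] : List String)) = "" := by decide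
  cases hidx : (pvCleanLines block).findIdx? (fun l => PySem.Str.startswith l "Full text:") with
  | none =>
    cases hfind : (pvCleanLines block).find? (fun l => PySem.Str.startswith l "Title:") with
    | none => simp only [pvAtext, hidx, Option.map_none, hjoin]
    | some tl => simp only [pvAtext, hidx, Option.map_some, hjoin]
  | some i =>
    cases hfind : (pvCleanLines block).find? (fun l => PySem.Str.startswith l "Title:") with
    | none => simp only [pvAtext, hidx, Option.map_none]
    | some tl => simp only [pvAtext, hidx, Option.map_some]
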